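-- pv_equiv track=rewrite | github.com/ayushmankd/SE_LAB | NumBoundedRegions.py | NBR
-- ===== SOURCE A (Python) =====
-- def NBR(cfg):
--     numBoundedRegions = 0
--     # for i in cfg:
--     #     if len(cfg[i]) < 2: #If there are no two edges originating the skip
--     #         continue
--     #     else:
--     #         # If there are 2 edges from this node and both this edges end at the same node
--     #         # then its a Bounded Region
--     #         if cfg[cfg[i][0]] == cfg[cfg[i][1]]:
--     #             numBoundedRegions += 1
--     count = {}
--     for i in cfg:
--         if len(cfg[i]) == 1:
--             if cfg[i][0] in count:
--                 count[cfg[i][0]] += 1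
--             else:
--                 count[cfg[i][0]] = 1
--     for i in count:
--         if count[i] == 2:
--             numBoundedRegions += 1
--     return numBoundedRegions
-- ===== SOURCE B (Python) =====
-- def NBR(cfg):
--     # Single pass: track targets seen once / twice / three-or-more times as sets.
--     once, twice, more = set(), set(), set()
--     for i in cfg:
--         edges = cfg[i]
--         if len(edges) == 1:
--             t = edges[0]
--             if t in more:
--                 pass
--             elif t in twice:
--                 twice.discard(t)
--                 more.add(t)
--             elif t in once:
--                 once.discard(t)
--                 twice.add(t)
--             else:
--                 once.add(t)
--     return len(twice)
-- ===== Notes on version B (the rewrite author's own statement) =====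
-- stated objective: alternative
-- what changed: Replaces the count dictionary plus a second filtering pass over it by a single pass that maintains three membership sets (seen once / twice / three-or-more) and returns the size of the 'twice' set.
import Mathlib
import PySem

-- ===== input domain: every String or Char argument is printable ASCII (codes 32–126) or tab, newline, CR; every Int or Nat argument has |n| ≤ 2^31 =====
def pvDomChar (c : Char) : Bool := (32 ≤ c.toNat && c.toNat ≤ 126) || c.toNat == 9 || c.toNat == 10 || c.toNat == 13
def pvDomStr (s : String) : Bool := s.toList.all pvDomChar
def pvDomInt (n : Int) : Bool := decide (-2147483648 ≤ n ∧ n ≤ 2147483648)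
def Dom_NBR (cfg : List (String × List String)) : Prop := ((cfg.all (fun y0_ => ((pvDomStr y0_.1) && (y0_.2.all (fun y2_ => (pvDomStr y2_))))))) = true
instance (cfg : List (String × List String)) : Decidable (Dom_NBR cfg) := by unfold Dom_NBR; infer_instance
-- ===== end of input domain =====

-- B replaces A's count dictionary + second filtering pass by a single pass maintaining three
-- membership sets (targets seen once / twice / three-or-more) and returns the size of the
-- 'twice' set; alternative decomposition, same asymptotic cost.

-- ===== PORT A =====
-- the body of A's first loop for a single-edge node: increment count[t] (create at 1)
def NBR_astep (count : PySem.Dict String Int) (t : String) : PySem.Dict String Int :=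
  if count.contains t then count.insert t (count.getD t 0 + 1) else count.insert t 1

def NBR (cfg : List (String × List String)) : Int :=
  let count :=
    (PySem.Dict.ofList cfg).items.foldl
      (fun count p =>
        if p.2.length = 1 then NBR_astep count (PySem.List.pyGetD p.2 0 "") else count)
      PySem.Dict.empty
  count.items.foldl (fun n q => if q.2 = 2 then n + 1 else n) (0 : Int)

-- ===== PORT B =====
-- the body of B's loop for a single-edge node, on state (once, twice, more)
def NBR_bstep (st : PySem.Set String × PySem.Set String × PySem.Set String) (t : String) :
    PySem.Set String × PySem.Set String × PySem.Set String :=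
  if PySem.Set.contains st.2.2 t then st
  else if PySem.Set.contains st.2.1 t then
    (st.1, PySem.Set.discard st.2.1 t, PySem.Set.add st.2.2 t)
  else if PySem.Set.contains st.1 t then
    (PySem.Set.discard st.1 t, PySem.Set.add st.2.1 t, st.2.2)
  else (PySem.Set.add st.1 t, st.2.1, st.2.2)

def NBR_alt (cfg : List (String × List String)) : Int :=
  let st :=
    (PySem.Dict.ofList cfg).items.foldl
      (fun st p =>
        if p.2.length = 1 then NBR_bstep st (PySem.List.pyGetD p.2 0 "") else st)
      (PySem.Set.empty, PySem.Set.empty, PySem.Set.empty)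
  PySem.Set.len st.2.1

-- ===== PRECONDITION & SPEC =====
def Spec_NBR (cfg : List (String × List String)) (out : Int) : Prop := out = NBR_alt cfg
instance (cfg : List (String × List String)) (out : Int) : Decidable (Spec_NBR cfg out) := by unfold Spec_NBR; infer_instance

-- ===== CLAIM (what is proved, stated in full; the proofs are below) =====
def Claim_equal_NBR : Prop := ∀ (cfg : List (String × List String)), Dom_NBR cfg → Spec_NBR cfg (NBR cfg)

-- ===== LEMMAS AND PROOFS =====

-- the single-edge targets, in iteration order
def NBR_targets (l : List (String × List String)) : List String :=
  l.filterMap (fun p => if p.2.length = 1 then some (PySem.List.pyGetD p.2 0 "") else none)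

-- both loops only act on single-edge nodes: they are folds over the target list
theorem foldl_if_len {γ : Type} (g : γ → String → γ) (l : List (String × List String)) (init : γ) :
    l.foldl (fun acc p => if p.2.length = 1 then g acc (PySem.List.pyGetD p.2 0 "") else acc) init
      = (NBR_targets l).foldl g init := by
  induction l generalizing init with
  | nil => rfl
  | cons p l ih =>
    simp only [List.foldl_cons, NBR_targets, List.filterMap_cons]
    split <;> simp_all [NBR_targets]

-- A's increment step is the Counter step
theorem astep_eq_modify (c : PySem.Dict String Int) (t : String) :
    NBR_astep c t = c.modify t 0 (· + 1) := by
  unfold NBR_astep PySem.Dict.modify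
  split
  · rfl
  · rename_i h
    rw [PySem.Dict.getD_of_not_contains c 0 (by simpa using h)]
    norm_num

theorem count_fold_eq_counter (ts : List String) :
    ts.foldl NBR_astep PySem.Dict.empty = PySem.Dict.counter ts := by
  unfold PySem.Dict.counter
  congr 1
  funext c t
  exact astep_eq_modify c t

-- the invariant B's state satisfies
def NBR_Inv (ts : List String) (st : PySem.Set String × PySem.Set String × PySem.Set String) : Prop :=
  st.1.Nodup ∧ st.2.1.Nodup ∧ st.2.2.Nodup ∧
  (∀ x, x ∈ st.1 ↔ ts.count x = 1) ∧
  (∀ x, x ∈ st.2.1 ↔ ts.count x = 2) ∧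
  (∀ x, x ∈ st.2.2 ↔ 3 ≤ ts.count x)

theorem bstep_inv (ts : List String) (t : String)
    (st : PySem.Set String × PySem.Set String × PySem.Set String)
    (h : NBR_Inv ts st) : NBR_Inv (ts ++ [t]) (NBR_bstep st t) := by
  obtain ⟨h1, h2, h3, ho, htw, hm⟩ := h
  have hc : ∀ x : String, (ts ++ [t]).count x = ts.count x + (if x = t then 1 else 0) := by
    intro x; by_cases hx : x = t <;> simp [List.count_append, hx, List.count_eq_zero]
  have memc : ∀ (s : PySem.Set String) (x : String),
      PySem.Set.contains s x = true ↔ x ∈ s := by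
    intro s x; simp [PySem.Set.contains]
  unfold NBR_bstep
  by_cases hmt : PySem.Set.contains st.2.2 t = true
  · -- t ∈ more
    rw [if_pos hmt]
    rw [memc] at hmt
    have h3t : 3 ≤ ts.count t := (hm t).1 hmt
    refine ⟨h1, h2, h3, ?_, ?_, ?_⟩ <;> intro x <;> rw [hc] <;> by_cases hx : x = t <;>
      subst_eqs <;> simp_all <;> omega
  · rw [if_neg hmt]
    rw [Bool.not_eq_true] at hmt; rw [← Bool.not_eq_true, memc] at hmt
    by_cases htt : PySem.Set.contains st.2.1 t = true
    · -- t ∈ twice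
      rw [if_pos htt]
      rw [memc] at htt
      have h2t : ts.count t = 2 := (htw t).1 htt
      refine ⟨h1, PySem.Set.nodup_discard _ _ h2, PySem.Set.nodup_add _ _ h3, ?_, ?_, ?_⟩ <;>
        intro x <;> rw [hc] <;> by_cases hx : x = t <;> subst_eqs <;>
        simp_all [PySem.Set.mem_discard]
    · rw [if_neg htt]
      rw [Bool.not_eq_true] at htt; rw [← Bool.not_eq_true, memc] at htt
      by_cases hot : PySem.Set.contains st.1 t = true
      · -- t ∈ once
        rw [if_pos hot]
        rw [memc] at hot
        have h1t : ts.count t = 1 := (ho t).1 hot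
        refine ⟨PySem.Set.nodup_discard _ _ h1, PySem.Set.nodup_add _ _ h2, h3, ?_, ?_, ?_⟩ <;>
          intro x <;> rw [hc] <;> by_cases hx : x = t <;> subst_eqs <;>
          simp_all [PySem.Set.mem_discard]
      · -- fresh t
        rw [if_neg hot]
        rw [Bool.not_eq_true] at hot; rw [← Bool.not_eq_true, memc] at hot
        have h0t : ts.count t = 0 := by
          by_contra h
          rcases Nat.lt_or_ge (ts.count t) 2 with hlt | hge
          · exact hot ((ho t).2 (by omega))
          · rcases Nat.lt_or_ge (ts.count t) 3 with hlt' | hge'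
            · exact htt ((htw t).2 (by omega))
            · exact hmt ((hm t).2 hge')
        refine ⟨PySem.Set.nodup_add _ _ h1, h2, h3, ?_, ?_, ?_⟩ <;>
          intro x <;> rw [hc] <;> by_cases hx : x = t <;> subst_eqs <;>
          simp_all

theorem bfold_inv (ts : List String) :
    NBR_Inv ts (ts.foldl NBR_bstep (PySem.Set.empty, PySem.Set.empty, PySem.Set.empty)) := by
  induction ts using List.reverseRecOn with
  | nil =>
    refine ⟨List.nodup_nil, List.nodup_nil, List.nodup_nil, ?_, ?_, ?_⟩ <;>
      intro x <;> simp [PySem.Set.empty]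
  | append_singleton ts t ih =>
    rw [List.foldl_concat]
    exact bstep_inv ts t _ ih

-- two nodup lists with the same members have the same length
theorem length_eq_of_nodup_of_mem_iff {l l' : List String}
    (h : l.Nodup) (h' : l'.Nodup) (hm : ∀ x, x ∈ l ↔ x ∈ l') : l.length = l'.length :=
  (List.perm_of_nodup_nodup_toFinset_eq h h'
    (Finset.ext (by simpa using hm))).length_eq

-- A's answer over a target list equals the size of B's 'twice' set
theorem counts_agree (ts : List String) :
    (PySem.Dict.counter ts).items.foldl (fun n q => if q.2 = 2 then n + 1 else n) (0 : Int)
      = PySem.Set.len (ts.foldl NBR_bstep (PySem.Set.empty, PySem.Set.empty, PySem.Set.empty)).2.1 := by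
  obtain ⟨-, h2, -, -, htw, -⟩ := bfold_inv ts
  have hA : (PySem.Dict.counter ts).items.foldl
      (fun n q => if q.2 = 2 then n + 1 else n) (0 : Int)
      = ((PySem.Set.ofList ts).countP (fun k => decide (ts.count k = 2)) : Int) := by
    have hfc := PySem.List.foldl_count_if (fun q : String × Int => decide (q.2 = 2))
      (PySem.Dict.counter ts).items 0
    simp only [decide_eq_true_eq] at hfc
    rw [hfc, PySem.Dict.items_counter, List.countP_map]
    have hp : ((fun q : String × Int => decide (q.2 = 2)) ∘ fun k => (k, (ts.count k : Int)))
        = fun k => decide (ts.count k = 2) := by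
      funext k
      simp only [Function.comp_apply, decide_eq_decide]
      omega
    rw [hp]
    norm_num
  rw [hA, PySem.Set.len]
  norm_num
  rw [List.countP_eq_length_filter]
  apply length_eq_of_nodup_of_mem_iff ((PySem.Set.nodup_ofList ts).filter _) h2
  intro x
  rw [List.mem_filter, PySem.Set.mem_ofList]
  constructor
  · rintro ⟨-, h⟩
    exact (htw x).2 (of_decide_eq_true h)
  · intro hmem
    have h := (htw x).1 hmem
    exact ⟨List.count_pos_iff.1 (by omega), decide_eq_true h⟩

-- ===== VERDICT (by name: the statement is the Claim_ definition above) =====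
theorem NBR_spec : Claim_equal_NBR := by
  intro cfg _
  show NBR cfg = NBR_alt cfg
  unfold NBR NBR_alt
  rw [foldl_if_len NBR_astep, foldl_if_len NBR_bstep, count_fold_eq_counter]
  exact counts_agree _
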